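-- pv_equiv track=rewrite | github.com/lucaski2/Competitive-Programming | USACOTraining/MilkingCows/main.py | find_longest_intervals
-- ===== SOURCE A (Python) =====
-- def find_longest_intervals(times):
--     if not times:
--         return 0, 0
--
--     # Sort the intervals by start time
--     times.sort(key=lambda x: x[0])
--
--     longest_milking = 0
--     longest_idle = 0
--     current_start = times[0][0]
--     current_end = times[0][1]
--
--     for start, end in times[1:]:
--         if start > current_end:
--             # Found an idle period
--             idle_time = start - current_end
--             longest_idle = max(longest_idle, idle_time)
--
--             # Update milking time
--             milking_time = current_end - current_start
--             longest_milking = max(longest_milking, milking_time)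
--
--             # Start a new milking period
--             current_start = start
--             current_end = end
--         else:
--             # Extend the current milking period if necessary
--             current_end = max(current_end, end)
--
--     # Check the last milking period
--     milking_time = current_end - current_start
--     longest_milking = max(longest_milking, milking_time)
--
--     return longest_milking, longest_idle
-- ===== SOURCE B (Python) =====
-- def find_longest_intervals(times):
--     if not times:
--         return 0, 0
--
--     # same in-place sort as the original (caller-visible mutation)
--     times.sort(key=lambda x: x[0])
--
--     # Pass 1: merge into explicit non-overlapping intervals.
--     merged = []
--     cs, ce = times[0]
--     for s, e in times[1:]:
--         if s > ce:
--             merged.append((cs, ce))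
--             cs, ce = s, e
--         else:
--             ce = max(ce, e)
--     merged.append((cs, ce))
--
--     # Pass 2: read the answers off the merged list.
--     longest_milking = max([0] + [e - s for s, e in merged])
--     longest_idle = max((b[0] - a[1] for a, b in zip(merged, merged[1:])), default=0)
--     return longest_milking, longest_idle
-- ===== Notes on version B (the rewrite author's own statement) =====
-- stated objective: simpler
-- what changed: Instead of threading two running maxima through the merge loop, B first materialises the merged non-overlapping intervals and then reads both answers off that list with two plain max expressions.
import Mathlib
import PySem

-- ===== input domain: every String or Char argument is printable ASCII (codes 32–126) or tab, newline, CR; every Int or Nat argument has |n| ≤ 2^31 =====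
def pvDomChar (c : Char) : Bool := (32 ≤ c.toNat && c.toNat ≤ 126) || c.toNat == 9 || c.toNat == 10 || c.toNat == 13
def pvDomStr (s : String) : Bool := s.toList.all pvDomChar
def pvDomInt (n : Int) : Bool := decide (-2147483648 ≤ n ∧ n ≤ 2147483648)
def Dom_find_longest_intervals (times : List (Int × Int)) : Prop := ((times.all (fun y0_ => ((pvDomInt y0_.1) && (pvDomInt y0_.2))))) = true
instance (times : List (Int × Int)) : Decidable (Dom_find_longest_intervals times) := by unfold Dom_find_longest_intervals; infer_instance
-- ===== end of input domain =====

-- B materialises the merged non-overlapping intervals and reads both maxima off that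
-- list afterwards, instead of threading the two running maxima through the merge loop.
-- Note: both Pythons sort `times` in place; the equivalence proved here is about the
-- return value (both perform the identical mutation).

-- ===== PORT A =====
-- literal port of A's for-loop: state (longest_milking, longest_idle, current_start, current_end)
def pvALoop (rest : List (Int × Int)) (lm li cs ce : Int) : Int × Int :=
  match rest with
  | [] => (max lm (ce - cs), li)
  | (s, e) :: tl =>
      if s > ce then
        pvALoop tl (max lm (ce - cs)) (max li (s - ce)) s e
      else
        pvALoop tl lm li cs (max ce e)

def find_longest_intervals (times : List (Int × Int)) : Int × Int :=
  match PySem.List.sorted times (fun x => x.1) false with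
  | [] => (0, 0)   -- `if not times: return 0, 0`
  | (cs, ce) :: tl => pvALoop tl 0 0 cs ce

-- ===== PORT B =====
-- B's merge loop, building the explicit list of non-overlapping intervals
def pvMerge (rest : List (Int × Int)) (cs ce : Int) (acc : List (Int × Int)) : List (Int × Int) :=
  match rest with
  | [] => acc ++ [(cs, ce)]
  | (s, e) :: tl =>
      if s > ce then pvMerge tl s e (acc ++ [(cs, ce)])
      else pvMerge tl cs (max ce e) acc

def find_longest_intervals_alt (times : List (Int × Int)) : Int × Int :=
  match PySem.List.sorted times (fun x => x.1) false with
  | [] => (0, 0)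
  | (cs, ce) :: tl =>
      let merged := pvMerge tl cs ce []
      let longest_milking := ((0 : Int) :: merged.map (fun p => p.2 - p.1)).foldl max 0
      let longest_idle := ((merged.zip (merged.drop 1)).map (fun ab => ab.2.1 - ab.1.2)).foldl max 0
      (longest_milking, longest_idle)

-- ===== PRECONDITION & SPEC =====
def Spec_find_longest_intervals (times : List (Int × Int)) (out : Int × Int) : Prop := out = find_longest_intervals_alt times
instance (times : List (Int × Int)) (out : Int × Int) : Decidable (Spec_find_longest_intervals times out) := by unfold Spec_find_longest_intervals; infer_instance

-- ===== CLAIM (what is proved, stated in full; the proofs are below) =====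
def Claim_equal_find_longest_intervals : Prop := ∀ (times : List (Int × Int)), Dom_find_longest_intervals times → Spec_find_longest_intervals times (find_longest_intervals times)

-- ===== LEMMAS AND PROOFS =====

-- proof-side reformulations of B's two max computations
def pvMil (l : List (Int × Int)) (acc : Int) : Int :=
  l.foldl (fun a p => max a (p.2 - p.1)) acc

def pvGaps (l : List (Int × Int)) (li : Int) : Int :=
  match l with
  | [] => li
  | [_] => li
  | p :: q :: r => pvGaps (q :: r) (max li (q.1 - p.2))

theorem pvMerge_acc (rest : List (Int × Int)) (cs ce : Int) (acc : List (Int × Int)) :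
    pvMerge rest cs ce acc = acc ++ pvMerge rest cs ce [] := by
  induction rest generalizing cs ce acc with
  | nil => simp [pvMerge]
  | cons h tl ih =>
      obtain ⟨s, e⟩ := h
      by_cases hc : s > ce
      · rw [pvMerge, pvMerge]
        simp only [hc, if_pos, List.nil_append]
        rw [ih s e (acc ++ [(cs, ce)]), ih s e [(cs, ce)]]
        simp
      · rw [pvMerge, pvMerge]
        simp only [hc, if_neg, not_false_iff]
        exact ih cs (max ce e) acc

theorem pvMerge_head (rest : List (Int × Int)) (cs ce : Int) :
    ∃ e' r, pvMerge rest cs ce [] = (cs, e') :: r := by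
  induction rest generalizing ce with
  | nil => exact ⟨ce, [], by simp [pvMerge]⟩
  | cons h tl ih =>
      obtain ⟨s, e⟩ := h
      by_cases hc : s > ce
      · refine ⟨ce, pvMerge tl s e [], ?_⟩
        rw [pvMerge]; simp only [hc, if_pos, List.nil_append]
        rw [pvMerge_acc]; simp
      · obtain ⟨e', r, hr⟩ := ih (max ce e)
        refine ⟨e', r, ?_⟩
        rw [pvMerge]; simp only [hc, if_neg, not_false_iff]
        exact hr

theorem pvALoop_eq (rest : List (Int × Int)) (cs ce lm li : Int) :
    pvALoop rest lm li cs ce =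
      (pvMil (pvMerge rest cs ce []) lm, pvGaps (pvMerge rest cs ce []) li) := by
  induction rest generalizing cs ce lm li with
  | nil => simp [pvALoop, pvMerge, pvMil, pvGaps]
  | cons h tl ih =>
      obtain ⟨s, e⟩ := h
      by_cases hc : s > ce
      · rw [pvALoop, pvMerge]
        simp only [hc, if_pos, List.nil_append]
        rw [pvMerge_acc tl s e [(cs, ce)]]
        obtain ⟨e', r, hr⟩ := pvMerge_head tl s e
        rw [hr, ih]
        simp [pvMil, pvGaps, hr]
      · rw [pvALoop, pvMerge]
        simp only [hc, if_neg, not_false_iff]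
        exact ih cs (max ce e) lm li

theorem pvMil_eq (l : List (Int × Int)) (acc : Int) :
    pvMil l acc = (acc :: l.map (fun p => p.2 - p.1)).foldl max acc := by
  simp [pvMil, max_self, List.foldl_map]

theorem pvGaps_eq (l : List (Int × Int)) (li : Int) :
    pvGaps l li = ((l.zip (l.drop 1)).map (fun ab => ab.2.1 - ab.1.2)).foldl max li := by
  induction l generalizing li with
  | nil => simp [pvGaps]
  | cons p tl ih =>
      cases tl with
      | nil => simp [pvGaps]
      | cons q r =>
          rw [pvGaps]
          simp only [List.drop, List.zip, List.zipWith, List.map, List.foldl]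
          exact ih (max li (q.1 - p.2))

-- ===== VERDICT (by name: the statement is the Claim_ definition above) =====
theorem find_longest_intervals_spec : Claim_equal_find_longest_intervals := by
  intro times _
  unfold Spec_find_longest_intervals find_longest_intervals find_longest_intervals_alt
  cases h : PySem.List.sorted times (fun x => x.1) false with
  | nil => rfl
  | cons hd tl =>
      obtain ⟨cs, ce⟩ := hd
      simp only
      rw [pvALoop_eq, pvMil_eq, pvGaps_eq]
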